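-- pv_equiv track=rewrite | github.com/tmatteso/exon_LLM | eval.py | compare_strings
-- ===== SOURCE A (Python) =====
-- def compare_strings(str1, str2):
--     differences = []
--     for i in range(min(len(str1), len(str2))):
--         if str1[i] != str2[i]:
--             differences.append((i, str1[i], str2[i]))
--     for i in range(min(len(str1), len(str2)), max(len(str1), len(str2))):
--         if len(str1) > len(str2):
--             differences.append((i, str1[i], None))
--         else:
--             differences.append((i, None, str2[i]))
--     return differences
-- ===== SOURCE B (Python) =====
-- def compare_strings(str1, str2):
--     n = max(len(str1), len(str2))
--     pairs = [(str1[i] if i < len(str1) else None,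
--               str2[i] if i < len(str2) else None) for i in range(n)]
--     return [(i, a, b) for i, (a, b) in enumerate(pairs) if a != b]
-- ===== Notes on version B (the rewrite author's own statement) =====
-- stated objective: idiomatic
-- what changed: Replaced A's two separate index loops (min-length comparison loop plus a len-comparison-branched tail loop) with a single pass: build the padded character-pair list and emit (i, a, b) under the one uniform condition a != b.
import Mathlib
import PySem

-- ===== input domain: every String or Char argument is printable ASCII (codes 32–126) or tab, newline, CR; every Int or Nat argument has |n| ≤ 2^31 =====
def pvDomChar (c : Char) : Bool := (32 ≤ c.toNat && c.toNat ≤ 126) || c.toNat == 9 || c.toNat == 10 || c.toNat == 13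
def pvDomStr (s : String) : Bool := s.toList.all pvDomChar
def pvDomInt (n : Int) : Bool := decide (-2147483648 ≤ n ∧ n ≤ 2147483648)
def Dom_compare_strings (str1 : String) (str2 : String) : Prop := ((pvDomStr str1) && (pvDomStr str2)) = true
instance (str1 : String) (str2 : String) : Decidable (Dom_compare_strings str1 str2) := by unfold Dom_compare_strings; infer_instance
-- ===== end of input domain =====

-- B replaces A's two index loops and the len-comparison branch by one padded zip pass
-- filtered with a single uniform condition (objective: idiomatic / simpler decomposition).
-- ===== PORT A =====
-- a Python 1-character string (the value str[i] yields)
def pvCh (c : Char) : String := String.mk [c]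

-- literal port of A: two index loops over ranges, appending to `differences`
def compare_strings (str1 : String) (str2 : String) : List (Int × Option String × Option String) :=
  let len1 : Int := PySem.Str.len str1
  let len2 : Int := PySem.Str.len str2
  let d1 := (PySem.List.pyRange 0 (min len1 len2) 1).foldl
    (fun acc i =>
      if (PySem.Str.pyGet? str1 i).map pvCh ≠ (PySem.Str.pyGet? str2 i).map pvCh then
        acc ++ [(i, (PySem.Str.pyGet? str1 i).map pvCh, (PySem.Str.pyGet? str2 i).map pvCh)]
      else acc) []
  (PySem.List.pyRange (min len1 len2) (max len1 len2) 1).foldl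
    (fun acc i =>
      if len2 < len1 then
        acc ++ [(i, (PySem.Str.pyGet? str1 i).map pvCh, none)]
      else
        acc ++ [(i, none, (PySem.Str.pyGet? str2 i).map pvCh)]) d1

-- ===== PORT B =====
-- literal port of B: build the padded pair list, then one enumerate+filter pass
def compare_strings_alt (str1 : String) (str2 : String) : List (Int × Option String × Option String) :=
  let l1 := str1.toList
  let l2 := str2.toList
  let n := max l1.length l2.length
  let pairs := (List.range n).map (fun i => (l1[i]?.map pvCh, l2[i]?.map pvCh))
  (PySem.List.enumerate pairs).filterMap (fun p =>
    if p.2.1 ≠ p.2.2 then some (p.1, p.2.1, p.2.2) else none)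

-- ===== PRECONDITION & SPEC =====
def Spec_compare_strings (str1 : String) (str2 : String) (out : List (Int × Option String × Option String)) : Prop := out = compare_strings_alt str1 str2
instance (str1 : String) (str2 : String) (out : List (Int × Option String × Option String)) : Decidable (Spec_compare_strings str1 str2 out) := by unfold Spec_compare_strings; infer_instance

-- ===== CLAIM (what is proved, stated in full; the proofs are below) =====
def Claim_equal_compare_strings : Prop := ∀ (str1 : String) (str2 : String), Dom_compare_strings str1 str2 → Spec_compare_strings str1 str2 (compare_strings str1 str2)

-- ===== LEMMAS AND PROOFS =====

-- Prop-test variant of the append-if loop shape, producing a filterMap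
theorem pv_foldl_ite {α β : Type} (P : α → Prop) [DecidablePred P] (f : α → β)
    (l : List α) (acc : List β) :
    l.foldl (fun acc x => if P x then acc ++ [f x] else acc) acc
      = acc ++ l.filterMap (fun x => if P x then some (f x) else none) := by
  induction l generalizing acc with
  | nil => simp
  | cons h t ih => by_cases hP : P h <;> simp [hP, ih]

-- enumerate of a mapped range is the range paired with its images
theorem pv_enumerate_map_range {α : Type} (f : Nat → α) (n : Nat) :
    PySem.List.enumerate ((List.range n).map f)
      = (List.range n).map (fun (k : Nat) => ((k : Int), f k)) := by
  induction n with
  | zero => simp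
  | succ n ih =>
    rw [List.range_succ, List.map_append, List.map_append,
        PySem.List.enumerate_append, ih]
    simp [PySem.List.enumerate_cons, PySem.List.enumerate_nil]

-- a filterMap that is everywhere `some` on its list is a map
theorem pv_filterMap_eq_map {α β : Type} (L : List α) (F : α → Option β) (G : α → β)
    (h : ∀ j ∈ L, F j = some (G j)) : L.filterMap F = L.map G := by
  rw [List.filterMap_congr h]
  exact List.filterMap_eq_map_iff_forall_eq_some.mpr fun x _ => rfl

-- ===== VERDICT (by name: the statement is the Claim_ definition above) =====
theorem compare_strings_spec : Claim_equal_compare_strings := by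
  intro s1 s2 _
  show compare_strings s1 s2 = compare_strings_alt s1 s2
  simp only [compare_strings, compare_strings_alt, PySem.Str.len_eq]
  rcases Nat.lt_or_ge s2.toList.length s1.toList.length with hba | hab
  · -- str2 is strictly shorter: the tail comes from str1
    have hlt : ((s2.toList.length : Int) < (s1.toList.length : Int)) := by omega
    rw [show min ((s1.toList.length : Int)) ((s2.toList.length : Int)) = (s2.toList.length : Int) by omega,
        show max ((s1.toList.length : Int)) ((s2.toList.length : Int)) = (s1.toList.length : Int) by omega,
        show max s1.toList.length s2.toList.length = s1.toList.length by omega,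
        PySem.List.pyRange_one, PySem.List.pyRange_one,
        show ((s2.toList.length : Int) - 0).toNat = s2.toList.length by omega,
        show ((s1.toList.length : Int) - (s2.toList.length : Int)).toNat = s1.toList.length - s2.toList.length by omega,
        pv_foldl_ite, pv_enumerate_map_range, List.filterMap_map]
    simp only [hlt, if_true]
    rw [PySem.List.foldl_append_singleton_eq_map, List.nil_append, List.filterMap_map,
        show s1.toList.length = s2.toList.length + (s1.toList.length - s2.toList.length) by omega,
        List.range_add, List.filterMap_append]
    congr 1
    · apply List.filterMap_congr
      intro k hk
      simp
    · symm
      rw [List.filterMap_map, List.map_map,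
          show s2.toList.length + (s1.toList.length - s2.toList.length) - s2.toList.length
             = s1.toList.length - s2.toList.length by omega]
      apply pv_filterMap_eq_map
      intro j hj
      simp only [List.mem_range] at hj
      have h1 : s2.toList[s2.toList.length + j]? = none := List.getElem?_eq_none (by omega)
      have h2 : s1.toList[s2.toList.length + j]? = some s1.toList[s2.toList.length + j] :=
        List.getElem?_eq_getElem (by omega)
      simp only [Function.comp_apply]
      rw [show ((s2.toList.length : Int) + (j : Int)) = ((s2.toList.length + j : Nat) : Int) from by push_cast; ring]
      simp only [PySem.Str.pyGet?_natCast, h1, h2, Option.map_some, Option.map_none]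
      rw [if_pos (by simp)]
  · -- str1 is the shorter (or equal) string: the tail comes from str2
    have hnotlt : ¬ ((s2.toList.length : Int) < (s1.toList.length : Int)) := by omega
    rw [show min ((s1.toList.length : Int)) ((s2.toList.length : Int)) = (s1.toList.length : Int) by omega,
        show max ((s1.toList.length : Int)) ((s2.toList.length : Int)) = (s2.toList.length : Int) by omega,
        show max s1.toList.length s2.toList.length = s2.toList.length by omega,
        PySem.List.pyRange_one, PySem.List.pyRange_one,
        show ((s1.toList.length : Int) - 0).toNat = s1.toList.length by omega,
        show ((s2.toList.length : Int) - (s1.toList.length : Int)).toNat = s2.toList.length - s1.toList.length by omega,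
        pv_foldl_ite, pv_enumerate_map_range, List.filterMap_map]
    simp only [hnotlt, if_false]
    rw [PySem.List.foldl_append_singleton_eq_map, List.nil_append, List.filterMap_map,
        show s2.toList.length = s1.toList.length + (s2.toList.length - s1.toList.length) by omega,
        List.range_add, List.filterMap_append]
    congr 1
    · apply List.filterMap_congr
      intro k hk
      simp
    · symm
      rw [List.filterMap_map, List.map_map,
          show s1.toList.length + (s2.toList.length - s1.toList.length) - s1.toList.length
             = s2.toList.length - s1.toList.length by omega]
      apply pv_filterMap_eq_map
      intro j hj
      simp only [List.mem_range] at hj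
      have h1 : s1.toList[s1.toList.length + j]? = none := List.getElem?_eq_none (by omega)
      have h2 : s2.toList[s1.toList.length + j]? = some s2.toList[s1.toList.length + j] :=
        List.getElem?_eq_getElem (by omega)
      simp only [Function.comp_apply]
      rw [show ((s1.toList.length : Int) + (j : Int)) = ((s1.toList.length + j : Nat) : Int) from by push_cast; ring]
      simp only [PySem.Str.pyGet?_natCast, h1, h2, Option.map_some, Option.map_none]
      rw [if_pos (by simp)]
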